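-- pv_equiv track=rewrite | github.com/Alatius/cavallinlatin | proofread/text_alignment.py | strip_tags_with_positions
-- ===== SOURCE A (Python) =====
-- def strip_tags_with_positions(text):
--     """Strip tags from text, returning (clean_text, mapping) where mapping[i]
--     gives the position in the original text for clean_text[i]."""
--     result = []
--     mapping = []
--     i = 0
--     while i < len(text):
--         if text[i] == '<':
--             end = text.find('>', i)
--             if end == -1:
--                 result.append(text[i])
--                 mapping.append(i)
--                 i += 1
--             else:
--                 i = end + 1
--         else:
--             result.append(text[i])
--             mapping.append(i)
--             i += 1
--     return ''.join(result), mapping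
-- ===== SOURCE B (Python) =====
-- def strip_tags_with_positions(text):
--     """Strip tags from text, returning (clean_text, mapping) where mapping[i]
--     gives the position in the original text for clean_text[i]."""
--     # build the index of tag spans first, then filter positions in one pass
--     spans = []
--     i = 0
--     while True:
--         lt = text.find('<', i)
--         if lt == -1:
--             break
--         gt = text.find('>', lt)
--         if gt == -1:
--             break
--         spans.append((lt, gt))
--         i = gt + 1
--
--     def covered(k):
--         return any(lt <= k <= gt for lt, gt in spans)
--
--     mapping = [k for k in range(len(text)) if not covered(k)]
--     return ''.join(text[k] for k in mapping), mapping
-- ===== Notes on version B (the rewrite author's own statement) =====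
-- stated objective: alternative
-- what changed: A is a single char-by-char scan that decides keep-or-skip at each tag opener while building the output inline; B first builds an index of tag spans by jumping with str.find from one delimiter to the next, then produces mapping and text in one filtering pass over all positions.
import Mathlib
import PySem

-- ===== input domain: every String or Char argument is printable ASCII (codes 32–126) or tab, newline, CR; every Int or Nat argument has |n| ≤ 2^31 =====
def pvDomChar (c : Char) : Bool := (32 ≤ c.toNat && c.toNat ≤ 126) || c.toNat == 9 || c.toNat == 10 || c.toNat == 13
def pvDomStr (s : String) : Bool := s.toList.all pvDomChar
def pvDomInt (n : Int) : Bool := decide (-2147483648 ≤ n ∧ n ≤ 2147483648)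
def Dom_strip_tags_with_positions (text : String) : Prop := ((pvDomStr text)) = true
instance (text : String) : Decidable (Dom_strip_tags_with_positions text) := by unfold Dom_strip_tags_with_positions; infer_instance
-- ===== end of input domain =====

-- B builds the tag-span index first and then filters positions; A scans char by char.

-- ===== PORT A =====

/-- `text.find(c, i)` for a single character `c` and `0 ≤ i`: index of the first
occurrence of `c` at position `≥ i`, `none` where Python returns `-1`
(exact on this single-character use; shared by both ports, as both Pythons call `str.find`). -/
def pvFindFrom (cs : List Char) (c : Char) (i : Nat) : Option Nat :=
  ((cs.drop i).findIdx? (· == c)).map (i + ·)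

/-- the `while i < len(text)` loop of A, carrying `result`/`mapping` accumulators. -/
def pvStripGo (cs : List Char) (i : Nat) (res : List Char) (map : List Int) :
    List Char × List Int :=
  if _h : i < cs.length then
    if cs.getD i ' ' = '<' then
      match hfe : pvFindFrom cs '>' i with
      | none => pvStripGo cs (i + 1) (res ++ [cs.getD i ' ']) (map ++ [(i : Int)])
      | some e => pvStripGo cs (e + 1) res map
    else
      pvStripGo cs (i + 1) (res ++ [cs.getD i ' ']) (map ++ [(i : Int)])
  else (res, map)
termination_by cs.length - i
decreasing_by
  · omega
  · simp only [pvFindFrom, Option.map_eq_some_iff] at hfe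
    obtain ⟨j, -, hj⟩ := hfe
    omega
  · omega

def strip_tags_with_positions (text : String) : String × List Int :=
  let r := pvStripGo text.toList 0 [] []
  (String.ofList r.1, r.2)

-- ===== PORT B =====

/-- B's first loop: the list of `(lt, gt)` tag spans, found by jumping from
`find('<', i)` to `find('>', lt)` and resuming at `gt + 1`.
(The `i < cs.length` test is a totality guard only: for `i ≥ cs.length` the
find returns `none` and the value is `[]` either way, as in the Python.) -/
def pvSpans (cs : List Char) (i : Nat) : List (Nat × Nat) :=
  if _h : i < cs.length then
    match hlt : pvFindFrom cs '<' i with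
    | none => []
    | some lt =>
      match hgt : pvFindFrom cs '>' lt with
      | none => []
      | some gt => (lt, gt) :: pvSpans cs (gt + 1)
  else []
termination_by cs.length - i
decreasing_by
  simp only [pvFindFrom, Option.map_eq_some_iff] at hlt hgt
  obtain ⟨j, -, hj⟩ := hlt
  obtain ⟨k, -, hk⟩ := hgt
  omega

/-- B's `covered(k)`: is position `k` inside one of the collected spans? -/
def pvCoveredBy (spans : List (Nat × Nat)) (k : Nat) : Bool :=
  spans.any (fun s => decide (s.1 ≤ k ∧ k ≤ s.2))

def strip_tags_with_positions_alt (text : String) : String × List Int :=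
  let cs := text.toList
  let spans := pvSpans cs 0
  let mapping := (List.range cs.length).filter (fun k => !(pvCoveredBy spans k))
  (String.ofList (mapping.map (fun k => cs.getD k ' ')), mapping.map (fun k => (k : Int)))

-- ===== PRECONDITION & SPEC =====
def Spec_strip_tags_with_positions (text : String) (out : String × List Int) : Prop := out = strip_tags_with_positions_alt text
instance (text : String) (out : String × List Int) : Decidable (Spec_strip_tags_with_positions text out) := by unfold Spec_strip_tags_with_positions; infer_instance

-- ===== CLAIM (what is proved, stated in full; the proofs are below) =====
def Claim_equal_strip_tags_with_positions : Prop := ∀ (text : String), Dom_strip_tags_with_positions text → Spec_strip_tags_with_positions text (strip_tags_with_positions text)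

-- ===== LEMMAS AND PROOFS =====

/-- the positions of `[i, len)` that B keeps, using the spans collected from `i`. -/
def pvKeep (cs : List Char) (i : Nat) : List Nat :=
  (List.range' i (cs.length - i)).filter (fun k => !(pvCoveredBy (pvSpans cs i) k))

theorem pvFindFrom_self (cs : List Char) (c : Char) (i : Nat) (h : i < cs.length)
    (heq : cs.getD i ' ' = c) : pvFindFrom cs c i = some i := by
  have hd := List.drop_eq_getElem_cons h
  have hgd : cs.getD i ' ' = cs[i] := List.getD_eq_getElem cs ' ' h
  rw [hgd] at heq
  simp [pvFindFrom, hd, List.findIdx?_cons, heq]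

theorem pvFindFrom_cons_ne (cs : List Char) (c : Char) (i : Nat) (h : i < cs.length)
    (hne : cs.getD i ' ' ≠ c) : pvFindFrom cs c i = pvFindFrom cs c (i + 1) := by
  have hd := List.drop_eq_getElem_cons h
  have hgd : cs.getD i ' ' = cs[i] := List.getD_eq_getElem cs ' ' h
  rw [hgd] at hne
  rw [pvFindFrom, pvFindFrom, hd, List.findIdx?_cons]
  rw [if_neg (by simpa using hne)]
  cases h' : (cs.drop (i + 1)).findIdx? (· == c) with
  | none => simp
  | some j => simp; omega

theorem pvFindFrom_none_mono (cs : List Char) (c : Char) (i j : Nat) (hij : i ≤ j)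
    (h : pvFindFrom cs c i = none) : pvFindFrom cs c j = none := by
  simp only [pvFindFrom, Option.map_eq_none_iff, List.findIdx?_eq_none_iff] at *
  intro x hx
  have hdj : cs.drop j = (cs.drop i).drop (j - i) := by
    rw [List.drop_drop]; congr 1; omega
  rw [hdj] at hx
  exact h x (List.drop_subset _ _ hx)

theorem pvFindFrom_lt_length (cs : List Char) (c : Char) (i e : Nat)
    (hg : pvFindFrom cs c i = some e) : i ≤ e ∧ e < cs.length := by
  simp only [pvFindFrom, Option.map_eq_some_iff] at hg
  obtain ⟨j, hj, hje⟩ := hg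
  rw [List.findIdx?_eq_some_iff_getElem] at hj
  obtain ⟨hlt, -, -⟩ := hj
  simp only [List.length_drop] at hlt
  omega

theorem pvSpans_bounds (cs : List Char) (i : Nat) :
    ∀ s ∈ pvSpans cs i, i ≤ s.1 ∧ s.1 ≤ s.2 := by
  intro s hs
  induction hn : cs.length - i using Nat.strong_induction_on generalizing i s with
  | _ n ih =>
    rw [pvSpans.eq_def] at hs
    split at hs
    · split at hs
      · simp at hs
      · rename_i lt hlt
        split at hs
        · simp at hs
        · rename_i gt hgt
          have h1 := pvFindFrom_lt_length cs '<' i lt hlt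
          have h2 := pvFindFrom_lt_length cs '>' lt gt hgt
          rcases List.mem_cons.mp hs with hh | ht
          · subst hh; exact ⟨h1.1, h2.1⟩
          · have := ih (cs.length - (gt + 1)) (by omega) (gt + 1) s ht rfl
            omega
    · simp at hs

theorem pvSpans_step (cs : List Char) (i : Nat) (h : i < cs.length)
    (hne : cs.getD i ' ' ≠ '<') : pvSpans cs i = pvSpans cs (i + 1) := by
  have hf := pvFindFrom_cons_ne cs '<' i h hne
  rw [pvSpans.eq_def, pvSpans.eq_def, dif_pos h, hf]
  by_cases h1 : i + 1 < cs.length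
  · rw [dif_pos h1]
  · rw [dif_neg h1]
    have : pvFindFrom cs '<' (i + 1) = none := by
      simp only [pvFindFrom, List.drop_eq_nil_of_le (by omega : cs.length ≤ i + 1)]
      simp
    rw [this]

theorem pvSpans_no_gt (cs : List Char) (i : Nat) (h : i < cs.length)
    (heq : cs.getD i ' ' = '<') (hg : pvFindFrom cs '>' i = none) :
    pvSpans cs i = [] ∧ pvSpans cs (i + 1) = [] := by
  constructor
  · rw [pvSpans.eq_def, dif_pos h, pvFindFrom_self cs '<' i h heq]
    simp only []
    split <;> simp_all
  · rw [pvSpans.eq_def]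
    split
    · cases hlt : pvFindFrom cs '<' (i + 1) with
      | none => simp [hlt]
      | some lt =>
        have hb := pvFindFrom_lt_length cs '<' (i + 1) lt hlt
        have hn : pvFindFrom cs '>' lt = none :=
          pvFindFrom_none_mono cs '>' i lt (by omega) hg
        split <;> [simp_all; skip]
        rename_i e1 hx
        injection hx with hx
        subst hx
        split <;> simp_all
    · rfl

theorem pvSpans_tag (cs : List Char) (i e : Nat) (h : i < cs.length)
    (heq : cs.getD i ' ' = '<') (hg : pvFindFrom cs '>' i = some e) :
    pvSpans cs i = (i, e) :: pvSpans cs (e + 1) := by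
  rw [pvSpans.eq_def, dif_pos h, pvFindFrom_self cs '<' i h heq]
  simp only []
  split <;> simp_all

theorem pvCoveredBy_false_of_gt (spans : List (Nat × Nat)) (k : Nat)
    (h : ∀ s ∈ spans, k < s.1) : pvCoveredBy spans k = false := by
  simp only [pvCoveredBy, List.any_eq_false, decide_eq_true_eq]
  intro s hs
  have := h s hs
  omega

theorem pvKeep_step (cs : List Char) (i : Nat) (h : i < cs.length)
    (hne : cs.getD i ' ' ≠ '<') : pvKeep cs i = i :: pvKeep cs (i + 1) := by
  unfold pvKeep
  rw [pvSpans_step cs i h hne]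
  have hr : cs.length - i = (cs.length - (i + 1)) + 1 := by omega
  rw [hr, List.range'_succ, List.filter_cons]
  rw [pvCoveredBy_false_of_gt (pvSpans cs (i + 1)) i
    (fun s hs => by have := pvSpans_bounds cs (i + 1) s hs; omega)]
  simp

theorem pvKeep_no_gt (cs : List Char) (i : Nat) (h : i < cs.length)
    (heq : cs.getD i ' ' = '<') (hg : pvFindFrom cs '>' i = none) :
    pvKeep cs i = i :: pvKeep cs (i + 1) := by
  obtain ⟨h0, h1⟩ := pvSpans_no_gt cs i h heq hg
  unfold pvKeep
  rw [h0, h1]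
  have hr : cs.length - i = (cs.length - (i + 1)) + 1 := by omega
  rw [hr, List.range'_succ]
  simp [pvCoveredBy]

theorem pvKeep_tag (cs : List Char) (i e : Nat) (h : i < cs.length)
    (heq : cs.getD i ' ' = '<') (hg : pvFindFrom cs '>' i = some e) :
    pvKeep cs i = pvKeep cs (e + 1) := by
  obtain ⟨hie, hel⟩ := pvFindFrom_lt_length cs '>' i e hg
  unfold pvKeep
  rw [pvSpans_tag cs i e h heq hg]
  have hr : cs.length - i = (e + 1 - i) + (cs.length - (e + 1)) := by omega
  have hsplit : List.range' i (cs.length - i) =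
      List.range' i (e + 1 - i) ++ List.range' (e + 1) (cs.length - (e + 1)) := by
    rw [hr, ← List.range'_append]
    congr 2
    omega
  rw [hsplit, List.filter_append]
  have h1 : (List.range' i (e + 1 - i)).filter
      (fun k => !(pvCoveredBy ((i, e) :: pvSpans cs (e + 1)) k)) = [] := by
    rw [List.filter_eq_nil_iff]
    intro a ha
    rw [List.mem_range'_1] at ha
    have hc : pvCoveredBy ((i, e) :: pvSpans cs (e + 1)) a = true := by
      simp only [pvCoveredBy, List.any_cons, Bool.or_eq_true, decide_eq_true_eq]
      left; exact ⟨ha.1, by omega⟩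
    simp [hc]
  have h2 : (List.range' (e + 1) (cs.length - (e + 1))).filter
      (fun k => !(pvCoveredBy ((i, e) :: pvSpans cs (e + 1)) k)) =
      (List.range' (e + 1) (cs.length - (e + 1))).filter
      (fun k => !(pvCoveredBy (pvSpans cs (e + 1)) k)) := by
    apply List.filter_congr
    intro k hk
    rw [List.mem_range'_1] at hk
    simp only [pvCoveredBy, List.any_cons]
    have : decide (i ≤ k ∧ k ≤ e) = false := by
      simp only [decide_eq_false_iff_not]
      omega
    rw [this]
    simp
  rw [h1, h2, List.nil_append]

theorem pvKeep_stop (cs : List Char) (i : Nat) (h : ¬ i < cs.length) :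
    pvKeep cs i = [] := by
  unfold pvKeep
  have : cs.length - i = 0 := by omega
  rw [this]
  simp

theorem pvKeep_main (cs : List Char) (i : Nat) (res : List Char) (map : List Int) :
    pvStripGo cs i res map =
      (res ++ (pvKeep cs i).map (fun k => cs.getD k ' '),
       map ++ (pvKeep cs i).map (fun k => (k : Int))) := by
  induction i, res, map using pvStripGo.induct with
  | cs => exact cs
  | @case1 i res map h heq hfe ih =>
    rw [pvStripGo.eq_def]
    rw [dif_pos h, if_pos heq, hfe]
    split
    · rw [ih, pvKeep_no_gt cs i h heq hfe]
      simp
    · rename_i e hx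
      exact absurd hx (by simp)
  | @case2 i res map h heq e hfe ih =>
    rw [pvStripGo.eq_def]
    rw [dif_pos h, if_pos heq, hfe]
    split
    · rename_i hx
      exact absurd hx (by simp)
    · rename_i e1 hx
      injection hx with hx
      subst hx
      rw [ih, pvKeep_tag cs i e h heq hfe]
  | @case3 i res map h heq ih =>
    rw [pvStripGo.eq_def]
    rw [dif_pos h, if_neg heq, ih, pvKeep_step cs i h heq]
    simp
  | @case4 i res map h =>
    rw [pvStripGo.eq_def]
    rw [dif_neg h, pvKeep_stop cs i h]
    simp

theorem strip_tags_with_positions_spec : Claim_equal_strip_tags_with_positions := by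
  intro text _
  unfold Spec_strip_tags_with_positions strip_tags_with_positions strip_tags_with_positions_alt
  rw [pvKeep_main]
  simp only [List.nil_append]
  have : (List.range text.toList.length).filter
      (fun k => !(pvCoveredBy (pvSpans text.toList 0) k)) = pvKeep text.toList 0 := by
    unfold pvKeep
    rw [List.range_eq_range', Nat.sub_zero]
  rw [this]
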